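-- pv_equiv track=rewrite | github.com/NikitaMensh/DiceWatcher | src/mechanics/mechanics.py | apply_reroll_ones
-- ===== SOURCE A (Python) =====
-- from typing import List, Dict, Optional
--
-- def apply_reroll_ones(dice: List[int], rerolled: List[int]) -> List[int]:
--     # You must provide the numbers from re-rolled dice (your app can capture a second image for rerolls).
--     out = []
--     rr_iter = iter(rerolled)
--     for d in dice:
--         if d == 1:
--             try:
--                 out.append(next(rr_iter))
--             except StopIteration:
--                 out.append(d)  # no replacement provided
--         else:
--             out.append(d)
--     return out
-- ===== SOURCE B (Python) =====
-- def apply_reroll_ones(dice, rerolled):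
--     # Outer loop over the reroll values: splice each one in at the next
--     # occurrence of a 1, found by list.index; stop when no 1 remains.
--     out = []
--     rest = dice
--     for val in rerolled:
--         if 1 not in rest:
--             break
--         i = rest.index(1)
--         out += rest[:i]
--         out.append(val)
--         rest = rest[i + 1:]
--     return out + rest
-- ===== Notes on version B (the rewrite author's own statement) =====
-- stated objective: alternative
-- what changed: B's outer loop runs over the reroll values, locating the next 1 with list.index and splicing with slices, instead of A's per-die loop consuming an iterator with StopIteration handling.
import Mathlib
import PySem

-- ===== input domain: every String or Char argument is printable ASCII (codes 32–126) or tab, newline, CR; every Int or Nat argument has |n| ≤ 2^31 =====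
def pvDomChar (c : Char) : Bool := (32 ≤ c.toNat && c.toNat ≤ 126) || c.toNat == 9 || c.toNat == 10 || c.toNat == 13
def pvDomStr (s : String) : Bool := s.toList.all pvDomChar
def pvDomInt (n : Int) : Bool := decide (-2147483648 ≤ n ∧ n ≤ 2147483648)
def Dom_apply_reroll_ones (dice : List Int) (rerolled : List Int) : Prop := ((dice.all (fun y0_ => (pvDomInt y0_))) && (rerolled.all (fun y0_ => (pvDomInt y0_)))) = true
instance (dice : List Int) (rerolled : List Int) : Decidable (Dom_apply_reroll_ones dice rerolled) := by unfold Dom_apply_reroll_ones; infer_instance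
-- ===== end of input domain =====

-- B loops over the reroll values, splicing each in at the next 1 via index/slices,
-- instead of A's per-die loop consuming an iterator with StopIteration handling.

-- ===== PORT A =====
def apply_reroll_ones (dice : List Int) (rerolled : List Int) : List Int :=
  match dice with
  | [] => []
  | d :: ds =>
    if d == 1 then
      match rerolled with
      | [] => d :: apply_reroll_ones ds []          -- StopIteration: keep the 1
      | r :: rs => r :: apply_reroll_ones ds rs     -- next(rr_iter)
    else
      d :: apply_reroll_ones ds rerolled

-- ===== PORT B =====
-- the 'for val in rerolled' loop of Source B, state = (out, rest); the 'none' branch of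
-- index? is unreachable because of the preceding 'contains' (membership) guard
def applyRerollLoop (out rest : List Int) (rr : List Int) : List Int :=
  match rr with
  | [] => out ++ rest
  | val :: rs =>
    if rest.contains 1 then
      match PySem.List.index? rest 1 with
      | some i =>
          applyRerollLoop
            (out ++ PySem.List.slice rest none (some (i : Int)) ++ [val])
            (PySem.List.slice rest (some ((i : Int) + 1)) none) rs
      | none => out ++ rest
    else out ++ rest

def apply_reroll_ones_alt (dice : List Int) (rerolled : List Int) : List Int :=
  applyRerollLoop [] dice rerolled

-- ===== PRECONDITION & SPEC =====
def Spec_apply_reroll_ones (dice : List Int) (rerolled : List Int) (out : List Int) : Prop := out = apply_reroll_ones_alt dice rerolled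
instance (dice : List Int) (rerolled : List Int) (out : List Int) : Decidable (Spec_apply_reroll_ones dice rerolled out) := by unfold Spec_apply_reroll_ones; infer_instance

-- ===== CLAIM (what is proved, stated in full; the proofs are below) =====
def Claim_equal_apply_reroll_ones : Prop := ∀ (dice : List Int) (rerolled : List Int), Dom_apply_reroll_ones dice rerolled → Spec_apply_reroll_ones dice rerolled (apply_reroll_ones dice rerolled)

-- ===== LEMMAS AND PROOFS =====

-- A with an empty reroll list is the identity
theorem a_nil (ds : List Int) : apply_reroll_ones ds [] = ds := by
  induction ds with
  | nil => rfl
  | cons d ds ih => by_cases h : d == 1 <;> simp [apply_reroll_ones, h, ih]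

-- A on dice without a 1 is the identity
theorem a_no_one (ds rr : List Int) (h : (1 : Int) ∉ ds) : apply_reroll_ones ds rr = ds := by
  induction ds generalizing rr with
  | nil => rfl
  | cons d ds ih =>
    have hd : ¬ (d == 1) = true := by simp; rintro rfl; exact h (by simp)
    simp [apply_reroll_ones, hd, ih _ (fun hm => h (List.mem_cons_of_mem _ hm))]

-- A replaces the FIRST 1 with the first reroll value, then recurses
theorem a_split (pre post rr : List Int) (v : Int) (h : (1 : Int) ∉ pre) :
    apply_reroll_ones (pre ++ 1 :: post) (v :: rr) = pre ++ v :: apply_reroll_ones post rr := by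
  induction pre with
  | nil => simp [apply_reroll_ones]
  | cons p ps ih =>
    have hp : ¬ (p == 1) = true := by simp; rintro rfl; exact h (by simp)
    simp only [List.cons_append, apply_reroll_ones, hp, Bool.false_eq_true, if_false]
    rw [ih (fun hm => h (List.mem_cons_of_mem _ hm))]

-- loop invariant: B's loop prepends its accumulator to A's answer on the remainder
theorem loop_eq (rr : List Int) : ∀ (out rest : List Int),
    applyRerollLoop out rest rr = out ++ apply_reroll_ones rest rr := by
  induction rr with
  | nil => intro out rest; simp [applyRerollLoop, a_nil]
  | cons v rs ih =>
    intro out rest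
    by_cases hmem : (1 : Int) ∈ rest
    · have hc : rest.contains 1 = true := by simpa using hmem
      have hsome : (PySem.List.index? rest 1).isSome := (PySem.List.index?_isSome_iff rest 1).mpr hmem
      obtain ⟨k, hk⟩ := Option.isSome_iff_exists.mp hsome
      obtain ⟨pre, suf, hrest, hlen, hnp⟩ := (PySem.List.index?_eq_some_iff rest 1 k).mp hk
      have hslice1 : PySem.List.slice rest none (some (k : Int)) = pre := by
        rw [PySem.List.slice_to_natCast, hrest, ← hlen, List.take_left]
      have hslice2 : PySem.List.slice rest (some ((k : Int) + 1)) none = suf := by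
        have : ((k : Int) + 1) = ((k + 1 : Nat) : Int) := by push_cast; ring
        rw [this, PySem.List.slice_from_natCast, hrest, ← hlen]
        rw [show pre.length + 1 = (pre ++ [(1:Int)]).length by simp,
            show pre ++ (1:Int) :: suf = (pre ++ [1]) ++ suf by simp,
            List.drop_left]
      simp only [applyRerollLoop, hc, if_true, hk, hslice1, hslice2]
      rw [ih, hrest, a_split pre suf rs v hnp]
      simp
    · simp [applyRerollLoop, hmem, a_no_one rest (v :: rs) hmem]

-- ===== VERDICT (by name: the statement is the Claim_ definition above) =====
theorem apply_reroll_ones_spec : Claim_equal_apply_reroll_ones := by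
  intro dice rerolled _
  unfold Spec_apply_reroll_ones apply_reroll_ones_alt
  rw [loop_eq, List.nil_append]
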